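-- pv_equiv track=rewrite | github.com/nasib10026/Image-processing-lab | Lab5/classwork.py | find_max_diameter
-- ===== SOURCE A (Python) =====
-- def find_max_diameter(border_points):
--     x_min = float('inf')
--     y_min = float('inf')
--     x_max = float('-inf')
--     y_max = float('-inf')
--
--     for point in border_points:
--         x, y = point
--         x_min = min(x,x_min)
--         y_min = min(y,y_min)
--         x_max = max(x,x_max)
--         y_max = max(y,y_max)
--
--     max_diameter = max(x_max - x_min , y_max - y_min)
--
--     return max_diameter
-- ===== SOURCE B (Python) =====
-- def find_max_diameter(border_points):
--     pts = [(x, y) for x, y in border_points]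
--     xs = sorted(p[0] for p in pts)
--     ys = sorted(p[1] for p in pts)
--     return max(xs[-1] - xs[0], ys[-1] - ys[0])
-- ===== Notes on version B (the rewrite author's own statement) =====
-- stated objective: alternative
-- what changed: Replaces the fused four-accumulator running-extrema loop with sorting each coordinate list and subtracting its endpoints (first/last of the sorted order).
-- outside the precondition, e.g. on find_max_diameter([]): A returns -inf, B raises IndexError
import Mathlib
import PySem

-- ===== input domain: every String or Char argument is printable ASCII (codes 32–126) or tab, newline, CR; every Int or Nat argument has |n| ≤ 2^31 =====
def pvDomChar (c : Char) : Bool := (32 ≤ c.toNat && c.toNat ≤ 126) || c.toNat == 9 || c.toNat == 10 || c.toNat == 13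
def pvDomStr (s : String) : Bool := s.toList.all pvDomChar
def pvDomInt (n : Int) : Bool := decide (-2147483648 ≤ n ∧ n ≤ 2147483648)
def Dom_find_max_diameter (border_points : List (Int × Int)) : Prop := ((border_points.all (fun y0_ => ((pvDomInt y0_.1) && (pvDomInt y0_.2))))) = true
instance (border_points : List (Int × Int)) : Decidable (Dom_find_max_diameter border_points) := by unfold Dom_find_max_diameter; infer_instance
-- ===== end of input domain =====

-- B replaces A's fused four-accumulator running-extrema loop with sorting each
-- coordinate list and subtracting its endpoints (alternative algorithm); equivalence
-- is claimed on nonempty inputs (Pre_ excludes [], where A returns the float -inf,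
-- not an int, and B raises IndexError).


-- ===== PORT A =====
-- 'none' models float('inf') / float('-inf') in the respective accumulator:
-- min(x, inf) = x:
def pyMinInf (x : Int) : Option Int → Int
  | none => x
  | some v => min x v
-- max(x, -inf) = x:
def pyMaxNegInf (x : Int) : Option Int → Int
  | none => x
  | some v => max x v
-- the loop body of A (updates (x_min, y_min, x_max, y_max)):
def pvAStep (st : Option Int × Option Int × Option Int × Option Int) (point : Int × Int) :
    Option Int × Option Int × Option Int × Option Int :=
  let (x, y) := point
  let (x_min, y_min, x_max, y_max) := st
  (some (pyMinInf x x_min), some (pyMinInf y y_min),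
   some (pyMaxNegInf x x_max), some (pyMaxNegInf y y_max))

def find_max_diameter (border_points : List (Int × Int)) : Int :=
  let st := border_points.foldl pvAStep (none, none, none, none)
  match st with
  | (some x_min, some y_min, some x_max, some y_max) => max (x_max - x_min) (y_max - y_min)
  | _ => 0   -- empty input: Python A yields the float -inf here, outside Pre_ (and the Int type)

-- ===== PORT B =====
def find_max_diameter_alt (border_points : List (Int × Int)) : Int :=
  let pts := border_points.map (fun p => (p.1, p.2))
  let xs := PySem.List.sorted (pts.map (fun p => p.1)) (fun v => v) false
  let ys := PySem.List.sorted (pts.map (fun p => p.2)) (fun v => v) false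
  -- xs[-1] / xs[0]: IndexError (= out of range) only on [], excluded by Pre_; default 0 never reached there
  max (PySem.List.pyGetD xs (-1) 0 - PySem.List.pyGetD xs 0 0)
      (PySem.List.pyGetD ys (-1) 0 - PySem.List.pyGetD ys 0 0)

-- ===== PRECONDITION & SPEC =====
-- Pre_ excludes the empty list: there A returns float('-inf') (not a value of the Int type)
-- and B raises IndexError (xs[-1] on an empty list).
def Pre_find_max_diameter (border_points : List (Int × Int)) : Prop := border_points ≠ []
instance (border_points : List (Int × Int)) : Decidable (Pre_find_max_diameter border_points) := by unfold Pre_find_max_diameter; infer_instance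
def pvWitness_find_max_diameter : (List (Int × Int)) := [(1, 2), (4, 0)]

def Spec_find_max_diameter (border_points : List (Int × Int)) (out : Int) : Prop := out = find_max_diameter_alt border_points
instance (border_points : List (Int × Int)) (out : Int) : Decidable (Spec_find_max_diameter border_points out) := by unfold Spec_find_max_diameter; infer_instance

-- ===== CLAIM (what is proved, stated in full; the proofs are below) =====
def Claim_equal_find_max_diameter : Prop := ∀ (border_points : List (Int × Int)), Dom_find_max_diameter border_points → Pre_find_max_diameter border_points → Spec_find_max_diameter border_points (find_max_diameter border_points)

-- ===== LEMMAS AND PROOFS =====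
-- once every accumulator is 'some', A's fold computes the coordinatewise running min/max:
theorem pvAStep_foldl (t : List (Int × Int)) (a b c d : Int) :
    t.foldl pvAStep (some a, some b, some c, some d) =
      (some ((t.map Prod.fst).foldl min a), some ((t.map Prod.snd).foldl min b),
       some ((t.map Prod.fst).foldl max c), some ((t.map Prod.snd).foldl max d)) := by
  induction t generalizing a b c d with
  | nil => simp
  | cons p t ih =>
      simp [pvAStep, pyMinInf, pyMaxNegInf, ih, min_comm, max_comm]

theorem foldl_min_mem (t : List Int) (x : Int) : t.foldl min x ∈ x :: t := by
  induction t generalizing x with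
  | nil => simp
  | cons y t ih =>
      rw [List.foldl_cons]
      rcases List.mem_cons.mp (ih (min x y)) with h | h
      · rw [h]
        rcases le_total x y with hxy | hxy
        · rw [min_eq_left hxy]; simp
        · rw [min_eq_right hxy]; simp
      · exact List.mem_cons_of_mem _ (List.mem_cons_of_mem _ h)

theorem foldl_min_le (t : List Int) (x : Int) : ∀ y ∈ x :: t, t.foldl min x ≤ y := by
  induction t generalizing x with
  | nil => simp
  | cons z t ih =>
      intro y hy
      rw [List.foldl_cons]
      rcases List.mem_cons.mp hy with h | h
      · subst h
        exact le_trans (ih (min y z) _ List.mem_cons_self) (min_le_left _ _)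
      · rcases List.mem_cons.mp h with h' | h'
        · subst h'
          exact le_trans (ih (min x y) _ List.mem_cons_self) (min_le_right _ _)
        · exact ih (min x z) y (List.mem_cons_of_mem _ h')

theorem foldl_max_mem (t : List Int) (x : Int) : t.foldl max x ∈ x :: t := by
  induction t generalizing x with
  | nil => simp
  | cons y t ih =>
      rw [List.foldl_cons]
      rcases List.mem_cons.mp (ih (max x y)) with h | h
      · rw [h]
        rcases le_total x y with hxy | hxy
        · rw [max_eq_right hxy]; simp
        · rw [max_eq_left hxy]; simp
      · exact List.mem_cons_of_mem _ (List.mem_cons_of_mem _ h)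

theorem le_foldl_max' (t : List Int) (x : Int) : ∀ y ∈ x :: t, y ≤ t.foldl max x := by
  induction t generalizing x with
  | nil => simp
  | cons z t ih =>
      intro y hy
      rw [List.foldl_cons]
      rcases List.mem_cons.mp hy with h | h
      · subst h
        exact le_trans (le_max_left _ _) (ih (max y z) _ List.mem_cons_self)
      · rcases List.mem_cons.mp h with h' | h'
        · subst h'
          exact le_trans (le_max_right _ _) (ih (max x y) _ List.mem_cons_self)
        · exact ih (max x z) y (List.mem_cons_of_mem _ h')

-- in a ≤-sorted list every element is bounded by the last:
theorem pairwise_le_getLast (s : List Int) (h : s ≠ []) (hp : s.Pairwise (· ≤ ·)) :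
    ∀ y ∈ s, y ≤ s.getLast h := by
  induction s with
  | nil => simp at h
  | cons a t ih =>
      intro y hy
      cases t with
      | nil => simp_all
      | cons b u =>
          rcases List.mem_cons.mp hy with h' | h'
          · subst h'
            have hlast : (b :: u).getLast (by simp) ∈ b :: u := List.getLast_mem _
            have := (List.pairwise_cons.mp hp).1 _ hlast
            simpa [List.getLast_cons] using this
          · have := ih (by simp) (List.pairwise_cons.mp hp).2 y h'
            simpa [List.getLast_cons] using this

-- head of the sorted coordinate list = running min; last = running max
theorem sorted_head_eq_min (x : Int) (t : List Int) :
    PySem.List.pyGetD (PySem.List.sorted (x :: t) (fun v => v) false) 0 0 = t.foldl min x := by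
  set s := PySem.List.sorted (x :: t) (fun v => v) false with hs
  have hperm : s.Perm (x :: t) := PySem.List.sorted_perm _ _ _
  have hne : s ≠ [] := by
    intro h; rw [h] at hperm; exact absurd hperm.symm (by simp)
  obtain ⟨m, r, hmr⟩ := List.exists_cons_of_ne_nil hne
  have hmem : m ∈ x :: t := hperm.mem_iff.mp (by simp [hmr])
  have hmin_le : t.foldl min x ≤ m := foldl_min_le t x m hmem
  have hle_min : m ≤ t.foldl min x := by
    have := PySem.List.key_head_sorted_le (x :: t) (fun v => v)
      (hs.symm.trans hmr) (t.foldl min x) (foldl_min_mem t x)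
    simpa using this
  rw [hmr]
  simp [PySem.List.pyGetD_zero_cons]
  omega

theorem sorted_last_eq_max (x : Int) (t : List Int) :
    PySem.List.pyGetD (PySem.List.sorted (x :: t) (fun v => v) false) (-1) 0 = t.foldl max x := by
  set s := PySem.List.sorted (x :: t) (fun v => v) false with hs
  have hperm : s.Perm (x :: t) := PySem.List.sorted_perm _ _ _
  have hne : s ≠ [] := by
    intro h; rw [h] at hperm; exact absurd hperm.symm (by simp)
  have hpw : s.Pairwise (· ≤ ·) := by
    have := PySem.List.sorted_pairwise (x :: t) (fun v => v)
    simpa [hs] using this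
  have hlast_mem : s.getLast hne ∈ x :: t := hperm.mem_iff.mp (List.getLast_mem hne)
  have h1 : s.getLast hne ≤ t.foldl max x := le_foldl_max' t x _ hlast_mem
  have h2 : t.foldl max x ≤ s.getLast hne :=
    pairwise_le_getLast s hne hpw _ (hperm.mem_iff.mpr (foldl_max_mem t x))
  rw [PySem.List.pyGetD_neg_one s 0 hne]
  omega

theorem find_max_diameter_spec : Claim_equal_find_max_diameter := by
  intro bp _ hpre
  unfold Spec_find_max_diameter
  match bp, hpre with
  | (x, y) :: t, _ =>
    simp only [find_max_diameter, find_max_diameter_alt, List.foldl_cons, pvAStep,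
      pyMinInf, pyMaxNegInf, List.map_cons, List.map_map, pvAStep_foldl]
    simp only [Function.comp_def]
    rw [sorted_head_eq_min, sorted_last_eq_max, sorted_head_eq_min, sorted_last_eq_max]
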